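-- pv_equiv track=rewrite | github.com/dParikesit/nerdle-solver | solver.py | uniqueCount
-- ===== SOURCE A (Python) =====
-- def uniqueCount(arr):
--     opr = set()
--     opd = set()
--     for i in range(len(arr)):
--         if arr[i]=='+' or arr[i]=='-' or arr[i]=='*' or arr[i]=='/' or arr[i]=='=':
--             opr.add(arr[i])
--         else:
--             opd.add(arr[i])
--     return len(opr),len(opd)
-- ===== SOURCE B (Python) =====
-- def uniqueCount(arr):
--     o = d = 0
--     prev = None
--     for x in sorted(arr):
--         if x != prev:
--             if x in ('+', '-', '*', '/', '='):
--                 o += 1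
--             else:
--                 d += 1
--         prev = x
--     return o, d
-- ===== Notes on version B (the rewrite author's own statement) =====
-- stated objective: alternative
-- what changed: A dedupes by filling two hash sets with an if/else inside the loop and returns their sizes; B uses no sets at all: it sorts the list once and scans it with a prev accumulator, counting only elements that start a new run (x != prev) and classifying each such first occurrence as operator or operand.
import Mathlib
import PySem

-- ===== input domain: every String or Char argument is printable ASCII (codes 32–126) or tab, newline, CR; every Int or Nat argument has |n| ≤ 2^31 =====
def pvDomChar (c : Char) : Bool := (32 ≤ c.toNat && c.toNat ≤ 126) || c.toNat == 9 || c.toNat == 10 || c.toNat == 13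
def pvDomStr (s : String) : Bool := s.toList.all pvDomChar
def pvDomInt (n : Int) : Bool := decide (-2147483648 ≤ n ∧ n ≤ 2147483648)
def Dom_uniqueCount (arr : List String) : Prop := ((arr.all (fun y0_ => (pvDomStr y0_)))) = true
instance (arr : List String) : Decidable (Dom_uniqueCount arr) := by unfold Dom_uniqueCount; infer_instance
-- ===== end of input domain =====

-- B replaces A's set-based partition (two sets filled by an if/else in a loop) by a
-- sort-then-scan: sort the list once, walk it counting elements that start a new run,
-- classifying each such first occurrence as operator or operand (objective: alternative).

-- ===== PORT A =====
-- loop body of A: classify arr[i] into the operator set or the operand set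
def uniqueCountStep (st : PySem.Set String × PySem.Set String) (x : String) :
    PySem.Set String × PySem.Set String :=
  if x == "+" || x == "-" || x == "*" || x == "/" || x == "=" then
    (PySem.Set.add st.1 x, st.2)
  else
    (st.1, PySem.Set.add st.2 x)

def uniqueCount (arr : List String) : Int × Int :=
  let st :=
    (PySem.List.pyRange 0 (PySem.List.len arr) 1).foldl
      (fun st i => uniqueCountStep st (PySem.List.pyGetD arr i ""))
      (PySem.Set.empty, PySem.Set.empty)
  ((st.1.length : Int), (st.2.length : Int))

-- ===== PORT B =====
-- loop body of B: (o, d, prev); count x when it differs from prev, then prev := x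
def uniqueCountAltStep (st : Int × Int × Option String) (x : String) :
    Int × Int × Option String :=
  if some x ≠ st.2.2 then
    if ["+", "-", "*", "/", "="].contains x then (st.1 + 1, st.2.1, some x)
    else (st.1, st.2.1 + 1, some x)
  else (st.1, st.2.1, some x)

def uniqueCount_alt (arr : List String) : Int × Int :=
  let st := (PySem.List.sorted arr (fun x => x) false).foldl uniqueCountAltStep (0, 0, none)
  (st.1, st.2.1)

-- ===== PRECONDITION & SPEC =====
def Spec_uniqueCount (arr : List String) (out : Int × Int) : Prop := out = uniqueCount_alt arr
instance (arr : List String) (out : Int × Int) : Decidable (Spec_uniqueCount arr out) := by unfold Spec_uniqueCount; infer_instance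

-- ===== CLAIM (what is proved, stated in full; the proofs are below) =====
def Claim_equal_uniqueCount : Prop := ∀ (arr : List String), Dom_uniqueCount arr → Spec_uniqueCount arr (uniqueCount arr)

-- ===== LEMMAS AND PROOFS =====

def pvIsOp (x : String) : Bool := x == "+" || x == "-" || x == "*" || x == "/" || x == "="

theorem pvStepEq (st : PySem.Set String × PySem.Set String) (x : String) :
    uniqueCountStep st x =
      if pvIsOp x then (PySem.Set.add st.1 x, st.2) else (st.1, PySem.Set.add st.2 x) := rfl

-- A's paired fold splits into two independent conditional folds
theorem pvFoldSplit (arr : List String) (p q : PySem.Set String) :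
    arr.foldl uniqueCountStep (p, q) =
      (arr.foldl (fun s x => if pvIsOp x then PySem.Set.add s x else s) p,
       arr.foldl (fun s x => if pvIsOp x then s else PySem.Set.add s x) q) := by
  induction arr generalizing p q with
  | nil => rfl
  | cons x xs ih =>
    simp only [List.foldl_cons, pvStepEq]
    by_cases h : pvIsOp x = true
    · simp [h, ih]
    · simp [h, ih]

-- conditional add-fold = fold over the filtered list
theorem pvFoldFilterPos (c : String → Bool) (arr : List String) (p : PySem.Set String) :
    arr.foldl (fun s x => if c x then PySem.Set.add s x else s) p =
      (arr.filter c).foldl PySem.Set.add p := by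
  induction arr generalizing p with
  | nil => rfl
  | cons x xs ih =>
    by_cases h : c x = true <;> simp [h, ih]

theorem pvFoldFilterNeg (c : String → Bool) (arr : List String) (p : PySem.Set String) :
    arr.foldl (fun s x => if c x then s else PySem.Set.add s x) p =
      (arr.filter (fun x => !c x)).foldl PySem.Set.add p := by
  induction arr generalizing p with
  | nil => rfl
  | cons x xs ih =>
    by_cases h : c x = true <;> simp [h, ih]

-- two nodup lists with the same members have the same length
theorem pvNodupLen {l₁ l₂ : List String} (h₁ : l₁.Nodup) (h₂ : l₂.Nodup)
    (hm : ∀ a, a ∈ l₁ ↔ a ∈ l₂) : l₁.length = l₂.length :=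
  ((List.perm_ext_iff_of_nodup h₁ h₂).mpr hm).length_eq

theorem pvContains (x : String) : (["+", "-", "*", "/", "="].contains x) = pvIsOp x := by
  rw [Bool.eq_iff_iff]
  simp [pvIsOp]
  tauto

-- the run-starts of a scan with previous element p (adjacent dedup relative to p)
def pvDestut (p : Option String) : List String → List String
  | [] => []
  | x :: xs => if some x = p then pvDestut p xs else x :: pvDestut (some x) xs

-- B's fold counts exactly the run-starts, split by pvIsOp
theorem pvAltFoldEq (l : List String) (o d : Int) (p : Option String) :
    (l.foldl uniqueCountAltStep (o, d, p)).1
        = o + ((pvDestut p l).countP pvIsOp : Int)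
      ∧ (l.foldl uniqueCountAltStep (o, d, p)).2.1
        = d + ((pvDestut p l).countP (fun x => !pvIsOp x) : Int) := by
  induction l generalizing o d p with
  | nil => simp [pvDestut]
  | cons x xs ih =>
    simp only [List.foldl_cons, uniqueCountAltStep, pvContains, pvDestut]
    by_cases hp : some x = p
    · simp [hp, ih]
    · by_cases hop : pvIsOp x = true
      · have := ih (o + 1) d (some x)
        simp [hp, hop, this]
        omega
      · have := ih o (d + 1) (some x)
        simp [hp, hop, this]
        omega

-- on a ≤-sorted list whose elements all dominate p, the run-starts are exactly the
-- distinct elements other than p, without duplicates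
theorem pvDestutSpec (l : List String) (p : Option String)
    (hs : l.Pairwise (· ≤ ·)) (hd : ∀ a, p = some a → ∀ y ∈ l, a ≤ y) :
    (∀ x, x ∈ pvDestut p l ↔ x ∈ l ∧ p ≠ some x) ∧ (pvDestut p l).Nodup := by
  induction l generalizing p with
  | nil => simp [pvDestut]
  | cons x xs ih =>
    have hx : ∀ y ∈ xs, x ≤ y := (List.pairwise_cons.mp hs).1
    have hxs : xs.Pairwise (· ≤ ·) := (List.pairwise_cons.mp hs).2
    by_cases hp : some x = p
    · have hrec := ih p hxs (by
        intro a ha y hy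
        exact hd a ha y (List.mem_cons_of_mem _ hy))
      have he : pvDestut p (x :: xs) = pvDestut p xs := by simp [pvDestut, hp]
      rw [he]
      constructor
      · intro z
        rw [hrec.1 z]
        constructor
        · rintro ⟨hz, hne⟩; exact ⟨List.mem_cons_of_mem _ hz, hne⟩
        · rintro ⟨hz, hne⟩
          rcases List.mem_cons.mp hz with h | h
          · exact absurd (hp ▸ h ▸ rfl) hne
          · exact ⟨h, hne⟩
      · exact hrec.2
    · have hrec := ih (some x) hxs (by
        intro a ha y hy
        injection ha with ha'; exact ha' ▸ hx y hy)
      have he : pvDestut p (x :: xs) = x :: pvDestut (some x) xs := by simp [pvDestut, hp]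
      rw [he]
      constructor
      · intro z
        rw [List.mem_cons, hrec.1 z]
        constructor
        · rintro (h | ⟨hz, hne⟩)
          · exact ⟨h ▸ List.mem_cons_self, fun hc => hp (h ▸ hc.symm)⟩
          · refine ⟨List.mem_cons_of_mem _ hz, ?_⟩
            intro hc
            rcases p with _ | a
            · simp at hc
            · injection hc with hc'
              have h1 : a ≤ x := hd a rfl x List.mem_cons_self
              have h2 : x ≤ z := hx z hz
              have : x = z := le_antisymm h2 (hc' ▸ h1)
              exact hne (congrArg some this)
        · rintro ⟨hz, hne⟩
          rcases List.mem_cons.mp hz with h | h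
          · exact Or.inl h
          · by_cases hzx : z = x
            · exact Or.inl hzx
            · exact Or.inr ⟨h, fun hc => hzx (Option.some.inj hc).symm⟩
      · refine List.nodup_cons.mpr ⟨?_, hrec.2⟩
        intro hmem
        exact ((hrec.1 x).mp hmem).2 rfl

-- ===== VERDICT (by name: the statement is the Claim_ definition above) =====
theorem uniqueCount_spec : Claim_equal_uniqueCount := by
  intro arr _
  unfold Spec_uniqueCount uniqueCount uniqueCount_alt
  rw [PySem.List.foldl_pyRange_zero_pyGetD arr "" uniqueCountStep]
  rw [pvFoldSplit, pvFoldFilterPos, pvFoldFilterNeg]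
  have hpos : ((arr.filter pvIsOp).foldl PySem.Set.add PySem.Set.empty) =
      PySem.Set.ofList (arr.filter pvIsOp) := (PySem.Set.ofList_eq_foldl _).symm
  have hneg : ((arr.filter (fun x => !pvIsOp x)).foldl PySem.Set.add PySem.Set.empty) =
      PySem.Set.ofList (arr.filter (fun x => !pvIsOp x)) := (PySem.Set.ofList_eq_foldl _).symm
  simp only [hpos, hneg]
  -- B side
  set l := PySem.List.sorted arr (fun x => x) false with hl
  have hsorted : l.Pairwise (· ≤ ·) := PySem.List.sorted_pairwise arr (fun x => x)
  have hds := pvDestutSpec l none hsorted (by intro a ha; simp at ha)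
  have halt := pvAltFoldEq l 0 0 none
  rw [Prod.mk.injEq, halt.1, halt.2]
  have hmem : ∀ x, x ∈ pvDestut none l ↔ x ∈ arr := by
    intro x
    rw [(hds.1 x)]
    simp [hl, PySem.List.mem_sorted]
  constructor
  · rw [List.countP_eq_length_filter]
    have : ((pvDestut none l).filter pvIsOp).length =
        (PySem.Set.ofList (arr.filter pvIsOp)).length := by
      apply pvNodupLen (hds.2.filter _) (PySem.Set.nodup_ofList _)
      intro a
      simp [List.mem_filter, PySem.Set.mem_ofList, hmem a]
    simp [this]
  · rw [List.countP_eq_length_filter]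
    have : ((pvDestut none l).filter (fun x => !pvIsOp x)).length =
        (PySem.Set.ofList (arr.filter (fun x => !pvIsOp x))).length := by
      apply pvNodupLen (hds.2.filter _) (PySem.Set.nodup_ofList _)
      intro a
      simp [List.mem_filter, PySem.Set.mem_ofList, hmem a]
    simp [this]
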